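-- pv_equiv track=rewrite | github.com/LiaoU3/LeetCode | Problems/40/40.py | combinationSum2
-- ===== SOURCE A (Python) =====
-- from typing import List
--
-- def combinationSum2(candidates: List[int], target: int) -> List[List[int]]:
--     candidates.sort()
--
--     res = []
--
--     def backtrack(i, total, curr):
--         if total > target:
--             return
--         if total == target:
--             res.append(curr.copy())
--             return
--         if i == len(candidates):
--             return
--
--         for j in range(i, len(candidates)):
--             if j > i and candidates[j] == candidates[j - 1]:
--                 continue
--             if total + candidates[j] > target:
--                 break
--             curr.append(candidates[j])
--             backtrack(j + 1, total + candidates[j], curr)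
--             curr.pop()
--
--     backtrack(0, 0, [])
--     return res
-- ===== SOURCE B (Python) =====
-- from typing import List
--
-- def combinationSum2(candidates: List[int], target: int) -> List[List[int]]:
--     candidates.sort()
--     groups = _groups(candidates)
--     res = []
--
--     def go(gs, remaining, curr):
--         if remaining < 0:
--             return
--         if remaining == 0:
--             res.append(curr)
--             return
--         if not gs:
--             return
--         v, cnt = gs[0]
--         if v > 0:
--             maxk = min(cnt, remaining // v)
--         else:
--             maxk = cnt
--         for k in range(maxk, -1, -1):
--             go(gs[1:], remaining - k * v, curr + [v] * k)
--
--     go(groups, target, [])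
--     return res
--
-- def _groups(xs):
--     if not xs:
--         return []
--     v = xs[0]
--     k = 1
--     while k < len(xs) and xs[k] == v:
--         k += 1
--     return [(v, k)] + _groups(xs[k:])
-- ===== Notes on version B (the rewrite author's own statement) =====
-- stated objective: alternative
-- what changed: Replaced A's element-wise backtracking with duplicate skipping and break pruning by a recursion over (distinct value, multiplicity) pairs built by run-length encoding the sorted list, taking k copies of each value from the maximum feasible count down to 0.
import Mathlib
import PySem

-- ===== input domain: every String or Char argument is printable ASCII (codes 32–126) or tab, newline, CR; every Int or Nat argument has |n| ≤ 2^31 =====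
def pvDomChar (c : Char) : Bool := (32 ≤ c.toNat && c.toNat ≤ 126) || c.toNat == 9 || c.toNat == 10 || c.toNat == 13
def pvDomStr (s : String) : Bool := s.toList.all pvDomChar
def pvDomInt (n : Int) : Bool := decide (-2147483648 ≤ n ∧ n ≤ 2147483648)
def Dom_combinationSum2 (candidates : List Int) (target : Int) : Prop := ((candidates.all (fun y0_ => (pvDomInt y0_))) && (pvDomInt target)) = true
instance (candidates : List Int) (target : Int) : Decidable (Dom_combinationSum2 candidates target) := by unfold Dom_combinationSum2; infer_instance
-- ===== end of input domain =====

-- B replaces A's element-wise duplicate-skipping backtracking with a run-length-grouped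
-- recursion over distinct values, taking k copies per value from the maximum feasible down to 0
-- (objective: alternative).  Both Pythons sort `candidates` in place; the equivalence proved
-- here is about the return value (B performs the same in-place sort).

-- ===== PORT A =====
mutual
-- the inner `for j in range(i, len(candidates))` loop of A's `backtrack`
def aFor (cands : List Int) (target : Int) (i : Nat) (total : Int) (curr : List Int) (j : Nat) : List (List Int) :=
  if _h : j < cands.length then
    let cj := cands.getD j 0
    if j > i ∧ cj = cands.getD (j - 1) 0 then
      aFor cands target i total curr (j + 1)           -- continue
    else if total + cj > target then
      []                                                -- break
    else
      aBacktrack cands target (j + 1) (total + cj) (curr ++ [cj]) ++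
        aFor cands target i total curr (j + 1)
  else []
termination_by (cands.length - j, 0)

-- A's nested function `backtrack(i, total, curr)`; the returned list is `res` in order
def aBacktrack (cands : List Int) (target : Int) (i : Nat) (total : Int) (curr : List Int) : List (List Int) :=
  if total > target then []
  else if total = target then [curr]
  else if i = cands.length then []
  else aFor cands target i total curr i
termination_by (cands.length - i, 1)
end

def combinationSum2 (candidates : List Int) (target : Int) : List (List Int) :=
  aBacktrack (PySem.List.sorted candidates (fun x => x) false) target 0 0 []

-- ===== PORT B =====
-- B's helper `_groups`: run-length encoding of the sorted list; the inner `while` is bRunLen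
def bRunLen (v : Int) : List Int → Nat
  | [] => 0
  | w :: r => if w = v then 1 + bRunLen v r else 0

def bGroups : List Int → List (Int × Int)
  | [] => []
  | v :: rest =>
    let k := bRunLen v rest
    (v, 1 + (k : Int)) :: bGroups (rest.drop k)
termination_by xs => xs.length
decreasing_by simp

mutual
-- B's nested function `go(gs, remaining, curr)`
def bGo (gs : List (Int × Int)) (remaining : Int) (curr : List Int) : List (List Int) :=
  if remaining < 0 then []
  else if remaining = 0 then [curr]
  else
    match gs with
    | [] => []
    | (v, cnt) :: rest =>
      let maxk := if v > 0 then min cnt (PySem.Int.floordiv remaining v) else cnt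
      bKLoop rest v remaining curr maxk
termination_by (gs.length, 0, 0)

-- B's `for k in range(maxk, -1, -1)` loop
def bKLoop (rest : List (Int × Int)) (v remaining : Int) (curr : List Int) (k : Int) : List (List Int) :=
  if k < 0 then []
  else
    bGo rest (remaining - k * v) (curr ++ List.replicate k.toNat v) ++
      bKLoop rest v remaining curr (k - 1)
termination_by (rest.length, 1, (k + 1).toNat)
end

def combinationSum2_alt (candidates : List Int) (target : Int) : List (List Int) :=
  bGo (bGroups (PySem.List.sorted candidates (fun x => x) false)) target []

-- ===== PRECONDITION & SPEC =====
def Spec_combinationSum2 (candidates : List Int) (target : Int) (out : List (List Int)) : Prop := out = combinationSum2_alt candidates target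
instance (candidates : List Int) (target : Int) (out : List (List Int)) : Decidable (Spec_combinationSum2 candidates target out) := by unfold Spec_combinationSum2; infer_instance

-- ===== CLAIM (what is proved, stated in full; the proofs are below) =====
def Claim_equal_combinationSum2 : Prop := ∀ (candidates : List Int) (target : Int), Dom_combinationSum2 candidates target → Spec_combinationSum2 candidates target (combinationSum2 candidates target)


-- ===== LEMMAS AND PROOFS =====

-- Abstract (suffix-structural) form of A's backtracking, used only by the proofs.
-- pvAF carries the previous array element as `prev` (the duplicate-skip test).
mutual
def pvAF (t : Int) (prev : Option Int) (s : List Int) (total : Int) (curr : List Int) : List (List Int) :=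
  match s with
  | [] => []
  | v :: rest =>
    if prev = some v then pvAF t (some v) rest total curr
    else if total + v > t then []
    else pvAB t rest (total + v) (curr ++ [v]) ++ pvAF t (some v) rest total curr
termination_by (s.length, 0)

def pvAB (t : Int) (s : List Int) (total : Int) (curr : List Int) : List (List Int) :=
  if total > t then []
  else if total = t then [curr]
  else if s = [] then []
  else pvAF t none s total curr
termination_by (s.length, 1)
end

def pvPrev (c : List Int) (i j : Nat) : Option Int :=
  if i < j then some (c.getD (j - 1) 0) else none

def pvK (p : Nat) (v rem : Int) : Int :=
  if v > 0 then min (p : Int) (PySem.Int.floordiv rem v) else (p : Int)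

lemma bGo_neg (gs : List (Int × Int)) (rem : Int) (curr : List Int) (h : rem < 0) :
    bGo gs rem curr = [] := by
  rw [bGo.eq_def, if_pos h]

lemma bGo_zero (gs : List (Int × Int)) (curr : List Int) : bGo gs 0 curr = [curr] := by
  rw [bGo.eq_def, if_neg (by omega), if_pos rfl]

lemma bGo_pos_nil (rem : Int) (curr : List Int) (h : 0 < rem) : bGo [] rem curr = [] := by
  rw [bGo.eq_def, if_neg (by omega), if_neg (by omega)]

lemma bGo_pos_cons (v cnt : Int) (rest : List (Int × Int)) (rem : Int) (curr : List Int)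
    (h : 0 < rem) :
    bGo ((v, cnt) :: rest) rem curr =
      bKLoop rest v rem curr (if v > 0 then min cnt (PySem.Int.floordiv rem v) else cnt) := by
  rw [bGo.eq_def, if_neg (by omega), if_neg (by omega)]

lemma bGroups_nil : bGroups [] = [] := by rw [bGroups]

lemma bGroups_cons (v : Int) (rest : List Int) :
    bGroups (v :: rest) =
      (v, 1 + (bRunLen v rest : Int)) :: bGroups (rest.drop (bRunLen v rest)) := by
  rw [bGroups]

-- index ports = suffix-structural forms
lemma pv_bridge (c : List Int) (t : Int) :
    ∀ n : Nat,
      (∀ j i total curr, i ≤ j → j ≤ c.length → c.length - j = n →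
        aFor c t i total curr j = pvAF t (pvPrev c i j) (c.drop j) total curr) ∧
      (∀ i total curr, i ≤ c.length → c.length - i = n →
        aBacktrack c t i total curr = pvAB t (c.drop i) total curr) := by
  intro n
  induction n using Nat.strong_induction_on with
  | _ n IH =>
    have hF : ∀ j i total curr, i ≤ j → j ≤ c.length → c.length - j = n →
        aFor c t i total curr j = pvAF t (pvPrev c i j) (c.drop j) total curr := by
      intro j i total curr hij hjlen hn
      by_cases hj : j < c.length
      · have hdrop : c.drop j = c.getD j 0 :: c.drop (j + 1) := by
          rw [List.getD_eq_getElem c 0 hj]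
          exact (List.getElem_cons_drop hj).symm
        rw [aFor, dif_pos hj, hdrop, pvAF]
        have hprev1 : pvPrev c i (j + 1) = some (c.getD j 0) := by
          simp [pvPrev, Nat.lt_succ_of_le hij]
        by_cases hskip : j > i ∧ c.getD j 0 = c.getD (j - 1) 0
        · have hpv : pvPrev c i j = some (c.getD j 0) := by
            rw [pvPrev, if_pos hskip.1]
            exact congrArg some hskip.2.symm
          rw [if_pos hskip, hpv, if_pos rfl]
          rw [(IH (n - 1) (by omega)).1 (j + 1) i total curr (by omega) (by omega) (by omega)]
          rw [hprev1]
        · have hpv : ¬ (pvPrev c i j = some (c.getD j 0)) := by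
            unfold pvPrev
            split
            · intro hc
              exact hskip ⟨by omega, (Option.some.inj hc).symm⟩
            · simp
          rw [if_neg hskip, if_neg hpv]
          by_cases hbr : total + c.getD j 0 > t
          · rw [if_pos hbr, if_pos hbr]
          · rw [if_neg hbr, if_neg hbr]
            rw [(IH (n - 1) (by omega)).2 (j + 1) (total + c.getD j 0) (curr ++ [c.getD j 0])
              (by omega) (by omega)]
            rw [(IH (n - 1) (by omega)).1 (j + 1) i total curr (by omega) (by omega) (by omega)]
            rw [hprev1]
      · have hj' : j = c.length := by omega
        rw [aFor, dif_neg hj, hj', List.drop_length, pvAF]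
    refine ⟨hF, ?_⟩
    intro i total curr hi hn
    rw [aBacktrack, pvAB]
    by_cases h1 : total > t
    · rw [if_pos h1, if_pos h1]
    · rw [if_neg h1, if_neg h1]
      by_cases h2 : total = t
      · rw [if_pos h2, if_pos h2]
      · rw [if_neg h2, if_neg h2]
        have hnil : (i = c.length) ↔ (c.drop i = []) := by
          rw [List.drop_eq_nil_iff]
          omega
        by_cases h3 : i = c.length
        · rw [if_pos h3, if_pos (hnil.mp h3)]
        · rw [if_neg h3, if_neg (fun hc => h3 (hnil.mpr hc))]
          rw [hF i i total curr le_rfl (by omega) hn]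
          have : pvPrev c i i = none := by simp [pvPrev]
          rw [this]

lemma pv_runLen_decomp (v : Int) (rest : List Int) :
    List.replicate (bRunLen v rest) v ++ rest.drop (bRunLen v rest) = rest := by
  induction rest with
  | nil => simp [bRunLen]
  | cons w r ih =>
    by_cases hw : w = v
    · subst hw
      rw [show bRunLen w (w :: r) = bRunLen w r + 1 by rw [bRunLen, if_pos rfl, Nat.add_comm]]
      rw [List.replicate_succ, List.drop_succ_cons, List.cons_append, ih]
    · simp [bRunLen, hw]

lemma pv_runLen_head_ne (v : Int) (rest : List Int) :
    ∀ w r', rest.drop (bRunLen v rest) = w :: r' → w ≠ v := by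
  induction rest with
  | nil => simp [bRunLen]
  | cons w0 r ih =>
    intro w r' h
    by_cases hw : w0 = v
    · subst hw
      rw [bRunLen, if_pos rfl, Nat.add_comm, List.drop_succ_cons] at h
      exact ih w r' h
    · rw [bRunLen, if_neg hw, List.drop_zero] at h
      cases h
      exact hw

lemma pvAF_nil_of_big (t : Int) :
    ∀ (s : List Int) (prev : Option Int) (total : Int) (curr : List Int),
      (∀ x ∈ s, total + x > t) → pvAF t prev s total curr = [] := by
  intro s
  induction s with
  | nil => intro prev total curr _; rw [pvAF]
  | cons v rest ih =>
    intro prev total curr h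
    rw [pvAF]
    by_cases hp : prev = some v
    · rw [if_pos hp]; exact ih _ _ _ (fun x hx => h x (List.mem_cons_of_mem _ hx))
    · rw [if_neg hp, if_pos (h v (List.mem_cons_self ..))]

lemma pvAB_nil_of_big (t : Int) (s : List Int) (total : Int) (curr : List Int)
    (hlt : total < t) (h : ∀ x ∈ s, total + x > t) : pvAB t s total curr = [] := by
  rw [pvAB, if_neg (by omega), if_neg (by omega)]
  split
  · rfl
  · exact pvAF_nil_of_big t s none total curr h

lemma pvAF_some_of_ne (t v : Int) (s : List Int) (total : Int) (curr : List Int)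
    (h : ∀ w r', s = w :: r' → w ≠ v) :
    pvAF t (some v) s total curr = pvAF t none s total curr := by
  cases s with
  | nil => rw [pvAF, pvAF]
  | cons w r =>
    have hw : w ≠ v := h w r rfl
    have hvw : (some v : Option Int) ≠ some w := by
      intro hh; exact hw (Option.some.inj hh).symm
    have hnw : (none : Option Int) ≠ some w := by simp
    rw [pvAF, pvAF, if_neg hvw, if_neg hnw]

lemma pvAF_skip_run (t v : Int) :
    ∀ (q : Nat) (tail : List Int) (total : Int) (curr : List Int),
      pvAF t (some v) (List.replicate q v ++ tail) total curr = pvAF t (some v) tail total curr := by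
  intro q
  induction q with
  | zero => intro tail total curr; rfl
  | succ q ih =>
    intro tail total curr
    rw [List.replicate_succ, List.cons_append, pvAF, if_pos rfl]
    exact ih tail total curr

lemma pvAF_none_eq_pvAB (t : Int) (tail : List Int) (total : Int) (curr : List Int)
    (hlt : total < t) : pvAF t none tail total curr = pvAB t tail total curr := by
  cases tail with
  | nil => rw [pvAF, pvAB, if_neg (by omega), if_neg (by omega), if_pos rfl]
  | cons w r => rw [pvAB, if_neg (by omega), if_neg (by omega), if_neg (by simp)]

lemma pv_bKLoop_shift (gs : List (Int × Int)) (v rem : Int) (curr : List Int) :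
    ∀ n : Nat, bKLoop gs v rem curr (n : Int) =
      bKLoop gs v (rem - v) (curr ++ [v]) ((n : Int) - 1) ++ bGo gs rem curr := by
  intro n
  induction n with
  | zero =>
    rw [bKLoop, if_neg (by omega), bKLoop, if_pos (by omega), bKLoop, if_pos (by omega)]
    simp
  | succ n ih =>
    have e1 : ((n + 1 : Nat) : Int) = (n : Int) + 1 := by push_cast; ring
    rw [e1, bKLoop, if_neg (by omega)]
    have e2 : ((n : Int) + 1) - 1 = (n : Int) := by ring
    rw [e2, ih]
    rw [show bKLoop gs v (rem - v) (curr ++ [v]) (n : Int) =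
        bGo gs (rem - v - (n : Int) * v) ((curr ++ [v]) ++ List.replicate ((n : Int)).toNat v) ++
          bKLoop gs v (rem - v) (curr ++ [v]) ((n : Int) - 1) from by
      rw [bKLoop, if_neg (by omega)]]
    have h2 : rem - ((n : Int) + 1) * v = rem - v - (n : Int) * v := by ring
    have h3 : (((n : Int) + 1)).toNat = n + 1 := by omega
    have h4 : ((n : Int)).toNat = n := by omega
    rw [h2, h3, h4, List.replicate_succ]
    simp [List.append_assoc]

lemma pvR (t v : Int) (tail : List Int)
    (hhead : ∀ w r', tail = w :: r' → v < w)
    (hsorted : tail.Pairwise (· ≤ ·))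
    (Mtail : ∀ total curr, pvAB t tail total curr = bGo (bGroups tail) (t - total) curr) :
    ∀ (p : Nat) (total : Int) (curr : List Int), total < t →
      pvAB t (List.replicate p v ++ tail) total curr =
        bKLoop (bGroups tail) v (t - total) curr (pvK p v (t - total)) := by
  intro p
  induction p with
  | zero =>
    intro total curr hlt
    have hK0 : pvK 0 v (t - total) = 0 := by
      unfold pvK
      split
      · rename_i hv
        have h0 : (0 : Int) ≤ PySem.Int.floordiv (t - total) v :=
          (PySem.Int.le_floordiv_iff_mul_le hv).mpr (by nlinarith)
        simp [min_eq_left h0]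
      · norm_num
    rw [hK0, bKLoop, if_neg (by omega), bKLoop, if_pos (by omega)]
    simp [Mtail total curr]
  | succ p ih =>
    intro total curr hlt
    have htailne : ∀ w r', tail = w :: r' → w ≠ v := fun w r' h => ne_of_gt (hhead w r' h)
    rw [List.replicate_succ, List.cons_append, pvAB, if_neg (by omega), if_neg (by omega),
      if_neg (by simp), pvAF, if_neg (by simp)]
    by_cases hbr : total + v > t
    · -- break: one copy already overshoots; both sides are []
      rw [if_pos hbr]
      have hv : 0 < v := by omega
      have hfd : PySem.Int.floordiv (t - total) v = 0 :=
        (PySem.Int.floordiv_eq_iff_of_pos hv).mpr (by constructor <;> nlinarith)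
      have hK : pvK (p + 1) v (t - total) = 0 := by
        unfold pvK
        rw [if_pos hv, hfd]
        omega
      rw [hK, bKLoop, if_neg (by omega), bKLoop, if_pos (by omega)]
      have hbig : ∀ x ∈ tail, total + x > t := by
        intro x hx
        cases tail with
        | nil => simp at hx
        | cons w r' =>
          have hvw : v < w := hhead w r' rfl
          have hwx : w ≤ x := by
            rcases List.mem_cons.mp hx with h | h
            · omega
            · exact (List.pairwise_cons.mp hsorted).1 x h
          omega
      have := Mtail total curr
      rw [pvAB_nil_of_big t tail total curr hlt hbig] at this
      simp [← this]
    · rw [if_neg hbr, pvAF_skip_run, pvAF_some_of_ne t v tail total curr htailne,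
        pvAF_none_eq_pvAB t tail total curr hlt, Mtail total curr]
      by_cases heq : total + v = t
      · -- exactly one copy reaches the target
        have hv : 0 < v := by omega
        have hrem : t - total = v := by omega
        have hfd : PySem.Int.floordiv v v = 1 :=
          (PySem.Int.floordiv_eq_iff_of_pos hv).mpr (by constructor <;> nlinarith)
        have hK : pvK (p + 1) v (t - total) = 1 := by
          unfold pvK
          rw [if_pos hv, hrem, hfd]
          omega
        rw [hK, bKLoop, if_neg (by omega), bKLoop, if_neg (by omega), bKLoop, if_pos (by omega)]
        rw [pvAB, if_neg (by omega), if_pos heq]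
        have hz : t - total - 1 * v = 0 := by omega
        rw [hz]
        rw [show (1 : Int).toNat = 1 from rfl]
        rw [bGo_zero]
        simp
      · -- total + v < t : use the induction hypothesis and shift the k-loop
        have hlt' : total + v < t := by omega
        have hih := ih (total + v) (curr ++ [v]) hlt'
        have hrw : t - (total + v) = t - total - v := by ring
        rw [hrw] at hih
        rw [hih]
        set K' := pvK p v (t - total - v) with hK'
        have hK'0 : 0 ≤ K' := by
          rw [hK']
          unfold pvK
          split
          · rename_i hv
            have h0 : (0 : Int) ≤ PySem.Int.floordiv (t - total - v) v :=
              (PySem.Int.le_floordiv_iff_mul_le hv).mpr (by nlinarith)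
            have h1 : (0 : Int) ≤ ((p : Nat) : Int) := by positivity
            exact le_min h1 h0
          · omega
        have hKstep : pvK (p + 1) v (t - total) = K' + 1 := by
          rw [hK']
          unfold pvK
          by_cases hv : v > 0
          · rw [if_pos hv, if_pos hv]
            set q := PySem.Int.floordiv (t - total) v with hq
            have hqb := (PySem.Int.floordiv_eq_iff_of_pos hv).mp hq.symm
            have hfd : PySem.Int.floordiv (t - total - v) v = q - 1 :=
              (PySem.Int.floordiv_eq_iff_of_pos hv).mpr (by constructor <;> nlinarith)
            rw [hfd]
            have hc1 : ((p + 1 : Nat) : Int) = ((p : Nat) : Int) + 1 := by push_cast; ring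
            rw [hc1]
            omega
          · rw [if_neg hv, if_neg hv]
            push_cast
            ring
        rw [hKstep]
        have hsh := pv_bKLoop_shift (bGroups tail) v (t - total) curr (K' + 1).toNat
        have hcast : (((K' + 1).toNat : Nat) : Int) = K' + 1 := by omega
        rw [hcast] at hsh
        have hcast2 : K' + 1 - 1 = K' := by ring
        rw [hcast2] at hsh
        rw [hsh]

lemma pvM (t : Int) :
    ∀ (N : Nat) (s : List Int), s.length = N → s.Pairwise (· ≤ ·) →
      ∀ total curr, pvAB t s total curr = bGo (bGroups s) (t - total) curr := by
  intro N
  induction N using Nat.strong_induction_on with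
  | _ N IH =>
    intro s hlen hsort total curr
    by_cases h1 : total > t
    · rw [pvAB, if_pos h1, bGo_neg _ _ _ (by omega)]
    · by_cases h2 : total = t
      · rw [pvAB, if_neg h1, if_pos h2, show t - total = 0 by omega, bGo_zero]
      · have hlt : total < t := by omega
        cases s with
        | nil =>
          rw [pvAB, if_neg h1, if_neg h2, if_pos rfl]
          rw [bGroups_nil, bGo_pos_nil _ _ (by omega)]
        | cons v rest =>
          set k := bRunLen v rest with hk
          set tail := rest.drop k with htl
          have hdecomp : List.replicate k v ++ tail = rest := pv_runLen_decomp v rest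
          have hheadne : ∀ w r', tail = w :: r' → w ≠ v := pv_runLen_head_ne v rest
          have htailsub : tail.Sublist rest := List.drop_sublist k rest
          have hlensub : tail.length ≤ rest.length := htailsub.length_le
          have hsorttail : tail.Pairwise (· ≤ ·) :=
            ((List.pairwise_cons.mp hsort).2).sublist htailsub
          have hhead : ∀ w r', tail = w :: r' → v < w := by
            intro w r' h
            have hmem : w ∈ rest := htailsub.mem (h ▸ List.mem_cons_self ..)
            have hle : v ≤ w := (List.pairwise_cons.mp hsort).1 w hmem
            exact lt_of_le_of_ne hle (Ne.symm (hheadne w r' h))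
          have hlentail : tail.length < N := by
            simp at hlen
            omega
          have Mtail : ∀ total curr, pvAB t tail total curr = bGo (bGroups tail) (t - total) curr :=
            IH tail.length hlentail tail rfl hsorttail
          have hR := pvR t v tail hhead hsorttail Mtail (k + 1) total curr hlt
          have hs : v :: rest = List.replicate (k + 1) v ++ tail := by
            rw [List.replicate_succ, List.cons_append, hdecomp]
          conv_lhs => rw [hs]
          rw [hR, bGroups_cons, ← hk, ← htl, bGo_pos_cons _ _ _ _ _ (by omega)]
          unfold pvK
          have hc : ((k + 1 : Nat) : Int) = 1 + (k : Int) := by push_cast; ring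
          rw [hc]


-- ===== VERDICT (by name: the statement is the Claim_ definition above) =====
theorem combinationSum2_spec : Claim_equal_combinationSum2 := by
  intro candidates target _
  unfold Spec_combinationSum2 combinationSum2 combinationSum2_alt
  set sc := PySem.List.sorted candidates (fun x => x) false with hsc
  have hb := (pv_bridge sc target (sc.length - 0)).2 0 0 [] (Nat.zero_le _) rfl
  rw [hb]
  have hsort : sc.Pairwise (· ≤ ·) := by
    simpa using PySem.List.sorted_pairwise (xs := candidates) (key := fun x => x)
  have := pvM target sc.length sc rfl hsort 0 []
  simpa using this
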